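-- pv_equiv track=rewrite | github.com/rubelw/OSSS | src/OSSS/ai/agents/query_data/handlers/emergency_contacts_handler.py | _select_emergency_contacts_fields
-- ===== SOURCE A (Python) =====
-- from typing import Any, Dict, List, Sequence
--
-- def _select_emergency_contacts_fields(
--     rows: Sequence[Dict[str, Any]],
-- ) -> List[str]:
--     if not rows:
--         return []
--
--     preferred_order = [
--         "id",
--         "person_type",        # student, staff, etc.
--         "person_id",
--         "person_name",
--         "contact_name",
--         "relationship",
--         "priority",           # 1, 2, 3...
--         "is_primary",
--         "phone_1",
--         "phone_1_type",
--         "phone_2",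
--         "phone_2_type",
--         "email",
--         "address_line1",
--         "address_line2",
--         "city",
--         "state",
--         "postal_code",
--         "country",
--         "allowed_to_pick_up",
--         "notes",
--         "school_id",
--         "school_name",
--         "created_at",
--         "updated_at",
--     ]
--
--     all_keys: List[str] = []
--     for r in rows:
--         for k in r:
--             if k not in all_keys:
--                 all_keys.append(k)
--
--     ordered = [k for k in preferred_order if k in all_keys]
--     ordered.extend(k for k in all_keys if k not in ordered)
--     return ordered
-- ===== SOURCE B (Python) =====
-- from typing import Any, Dict, List, Sequence
--
-- def _select_emergency_contacts_fields(
--     rows: Sequence[Dict[str, Any]],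
-- ) -> List[str]:
--     preferred_order = [
--         "id",
--         "person_type",
--         "person_id",
--         "person_name",
--         "contact_name",
--         "relationship",
--         "priority",
--         "is_primary",
--         "phone_1",
--         "phone_1_type",
--         "phone_2",
--         "phone_2_type",
--         "email",
--         "address_line1",
--         "address_line2",
--         "city",
--         "state",
--         "postal_code",
--         "country",
--         "allowed_to_pick_up",
--         "notes",
--         "school_id",
--         "school_name",
--         "created_at",
--         "updated_at",
--     ]
--     rank = {k: i for i, k in enumerate(preferred_order)}
--     sentinel = len(preferred_order)
--     seen = list(dict.fromkeys(k for r in rows for k in r))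
--     return sorted(seen, key=lambda k: rank.get(k, sentinel))
-- ===== Notes on version B (the rewrite author's own statement) =====
-- stated objective: faster
-- what changed: Replaces A's quadratic list-membership dedup loop and two filter/extend passes over the preferred list by a hash-based dedup (dict.fromkeys) plus one stable sort keyed by a rank dict with a shared sentinel rank for non-preferred keys.
import Mathlib
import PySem

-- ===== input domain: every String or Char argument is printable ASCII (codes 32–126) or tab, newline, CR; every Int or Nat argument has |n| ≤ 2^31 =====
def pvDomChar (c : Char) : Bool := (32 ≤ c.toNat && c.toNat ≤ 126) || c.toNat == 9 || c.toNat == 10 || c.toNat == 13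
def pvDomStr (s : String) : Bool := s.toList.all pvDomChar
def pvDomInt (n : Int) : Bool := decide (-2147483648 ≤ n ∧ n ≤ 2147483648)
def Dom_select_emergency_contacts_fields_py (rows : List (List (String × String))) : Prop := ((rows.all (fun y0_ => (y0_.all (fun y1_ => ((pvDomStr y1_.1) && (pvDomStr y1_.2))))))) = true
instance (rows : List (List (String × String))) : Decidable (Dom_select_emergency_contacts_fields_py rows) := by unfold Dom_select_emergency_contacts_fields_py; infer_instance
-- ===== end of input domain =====

-- B replaces A's quadratic membership-scan dedup plus filter-and-extend by a hash dedup and one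
-- stable sort of the first-seen distinct keys keyed by a rank dict (measured faster; same return value).


-- the literal `preferred_order` list (identical in Source A and Source B)
def preferredOrder : List String :=
  ["id", "person_type", "person_id", "person_name", "contact_name", "relationship",
   "priority", "is_primary", "phone_1", "phone_1_type", "phone_2", "phone_2_type",
   "email", "address_line1", "address_line2", "city", "state", "postal_code",
   "country", "allowed_to_pick_up", "notes", "school_id", "school_name",
   "created_at", "updated_at"]

-- ===== PORT A =====
def select_emergency_contacts_fields_py (rows : List (List (String × String))) : List String :=
  if rows = [] then []
  else
    -- all_keys: for r in rows: for k in r: if k not in all_keys: all_keys.append(k)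
    let all_keys : List String :=
      rows.foldl (fun acc r =>
        r.foldl (fun acc kv => if acc.contains kv.1 then acc else acc ++ [kv.1]) acc) []
    -- ordered = [k for k in preferred_order if k in all_keys]
    let ordered : List String := preferredOrder.filter (fun k => all_keys.contains k)
    -- ordered.extend(k for k in all_keys if k not in ordered)
    ordered ++ all_keys.filter (fun k => !ordered.contains k)

-- ===== PORT B =====
-- rank = {k: i for i, k in enumerate(preferred_order)}
def rank_alt : PySem.Dict String Int :=
  (PySem.List.enumerate preferredOrder).foldl (fun d p => PySem.Dict.insert d p.2 p.1) PySem.Dict.empty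

def select_emergency_contacts_fields_py_alt (rows : List (List (String × String))) : List String :=
  let sentinel : Int := (preferredOrder.length : Int)
  -- seen = list(dict.fromkeys(k for r in rows for k in r))
  let seen : List String := PySem.List.dedup (rows.flatMap (fun r => r.map Prod.fst))
  -- sorted(seen, key=lambda k: rank.get(k, sentinel))
  PySem.List.sorted seen (fun k => PySem.Dict.getD rank_alt k sentinel)

-- ===== PRECONDITION & SPEC =====
def Spec_select_emergency_contacts_fields_py (rows : List (List (String × String))) (out : List String) : Prop := out = select_emergency_contacts_fields_py_alt rows
instance (rows : List (List (String × String))) (out : List String) : Decidable (Spec_select_emergency_contacts_fields_py rows out) := by unfold Spec_select_emergency_contacts_fields_py; infer_instance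

-- ===== CLAIM (what is proved, stated in full; the proofs are below) =====
def Claim_equal_select_emergency_contacts_fields_py : Prop := ∀ (rows : List (List (String × String))), Dom_select_emergency_contacts_fields_py rows → Spec_select_emergency_contacts_fields_py rows (select_emergency_contacts_fields_py rows)

-- ===== LEMMAS AND PROOFS =====

-- B's sort key, named for the proofs (definitionally the lambda in the port of B)
def keyB (k : String) : Int := PySem.Dict.getD rank_alt k ((preferredOrder.length : Int))

lemma items_fst : rank_alt.items.map Prod.fst = preferredOrder := by decide

lemma vals_le : ∀ p ∈ rank_alt.items, p.2 ≤ 24 := by decide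

lemma preferred_pairwise : preferredOrder.Pairwise (fun a b => keyB a < keyB b) := by decide

lemma keyB_lt_of_mem (k : String) (h : k ∈ preferredOrder) : keyB k < 25 := by
  fin_cases h <;> decide

lemma keyB_le (k : String) : keyB k ≤ 25 := by
  unfold keyB PySem.Dict.getD PySem.Dict.get?
  cases h : List.find? (fun p => p.1 == k) rank_alt.items with
  | none => simp [preferredOrder]
  | some p =>
    have hm := List.mem_of_find?_eq_some h
    have := vals_le p hm
    simp; omega

lemma keyB_of_not_mem (k : String) (h : k ∉ preferredOrder) : keyB k = 25 := by
  unfold keyB PySem.Dict.getD PySem.Dict.get?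
  have hn : List.find? (fun p => p.1 == k) rank_alt.items = none := by
    apply List.find?_eq_none.mpr
    intro p hp
    have : p.1 ∈ preferredOrder := items_fst ▸ List.mem_map_of_mem hp
    simp only [beq_iff_eq]
    intro hk; exact h (hk ▸ this)
  simp [hn, preferredOrder]

-- insert x at the front when it compares before every element
lemma insertBy_forall_before {α : Type} (before : α → α → Bool) (x : α) (zs : List α)
    (h : ∀ y ∈ zs, before x y = true) :
    PySem.List.insertBy before x zs = x :: zs := by
  cases zs with
  | nil => rfl
  | cons y ys => simp [PySem.List.insertBy, h y (by simp)]

-- inserting a key of strictly increasing rank into (filtered rank-ordered prefix ++ larger-key tail)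
lemma insert_filter (key : String → Int) (L Q : List String) (p : String → Bool) (x : String)
    (hL : L.Pairwise (fun a b => key a < key b)) (hx : x ∈ L) (hpx : p x = false)
    (hQ : ∀ q ∈ Q, key x < key q) :
    PySem.List.insertBy (fun a b => decide (key a < key b)) x (L.filter p ++ Q)
      = L.filter (fun k => p k || k == x) ++ Q := by
  induction L with
  | nil => exact absurd hx (by simp)
  | cons a L' ih =>
    have hpw := (List.pairwise_cons.mp hL).1
    have hL' := (List.pairwise_cons.mp hL).2
    rcases List.mem_cons.mp hx with rfl | hxL'
    · -- a = x: x goes first, before the filtered tail and all of Q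
      have hxnot : x ∉ L' := fun hmem => lt_irrefl _ (hpw x hmem)
      rw [List.filter_cons_of_neg (by simp [hpx]), List.filter_cons_of_pos (by simp)]
      have hfilt : L'.filter (fun k => p k || k == x) = L'.filter p := by
        apply List.filter_congr
        intro k hk
        have : k ≠ x := fun hkx => hxnot (hkx ▸ hk)
        simp [this]
      rw [hfilt]
      apply insertBy_forall_before
      intro y hy
      rcases List.mem_append.mp hy with hyf | hyq
      · have := hpw y (List.mem_of_mem_filter hyf)
        simpa using this
      · simpa using hQ y hyq
    · -- x ∈ L'
      have hax : key a < key x := hpw x hxL'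
      by_cases hpa : p a = true
      · rw [List.filter_cons_of_pos hpa, List.filter_cons_of_pos (by simp [hpa])]
        simp only [List.cons_append]
        rw [PySem.List.insertBy]
        have : ¬ (key x < key a) := by omega
        simp only [this, decide_false]
        rw [ih hL' hxL']
        rfl
      · rw [List.filter_cons_of_neg hpa]
        have hne : (a == x) = false := by
          have : a ≠ x := fun h => lt_irrefl _ (h ▸ hax)
          simpa using this
        rw [List.filter_cons_of_neg (by simp [hpa, hne])]
        exact ih hL' hxL'

-- the heart of the proof: the stable sort by keyB of a duplicate-free key list equals
-- "preferred keys in preferred order, then the remaining keys in original order"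
lemma sorted_keyB (S : List String) (hS : S.Nodup) :
    PySem.List.sorted S keyB
      = preferredOrder.filter (fun k => S.contains k)
        ++ S.filter (fun k => !preferredOrder.contains k) := by
  rw [PySem.List.sorted_eq_foldl_insertBy]
  induction S using List.reverseRecOn with
  | nil => simp
  | append_singleton ys x ih =>
    have hys : ys.Nodup := (List.nodup_append.mp hS).1
    have hxys : x ∉ ys := by
      simp only [List.nodup_append, List.nodup_cons] at hS
      exact fun hm => hS.2.2 x hm x (by simp) rfl
    rw [List.foldl_append, ih hys]
    simp only [List.foldl_cons, List.foldl_nil]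
    by_cases hxp : x ∈ preferredOrder
    · rw [insert_filter keyB preferredOrder _ _ x preferred_pairwise hxp
        (by simp only [List.contains_eq_mem, decide_eq_false_iff_not]; exact hxys)
        (by intro q hq
            have hq' : ¬ preferredOrder.contains q := by
              have := List.of_mem_filter hq; simpa using this
            rw [keyB_of_not_mem q (by simpa using hq')]
            exact keyB_lt_of_mem x hxp)]
      have h1 : preferredOrder.filter (fun k => ys.contains k || k == x)
          = preferredOrder.filter (fun k => (ys ++ [x]).contains k) := by
        apply List.filter_congr; intro k _
        have hbe : (k == x) = decide (k = x) := by by_cases h : k = x <;> simp [h]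
        simp [Bool.or_comm, hbe]
      have h2 : (ys ++ [x]).filter (fun k => !preferredOrder.contains k)
          = ys.filter (fun k => !preferredOrder.contains k) := by
        rw [List.filter_append]
        simp [hxp]
      rw [h1, h2]
    · rw [PySem.List.insertBy_of_forall_not_before _ x _ ?_]
      · have h1 : preferredOrder.filter (fun k => ys.contains k)
            = preferredOrder.filter (fun k => (ys ++ [x]).contains k) := by
          apply List.filter_congr; intro k hk
          have : k ≠ x := fun h => hxp (h ▸ hk)
          simp [this]
        have h2 : (ys ++ [x]).filter (fun k => !preferredOrder.contains k)
            = ys.filter (fun k => !preferredOrder.contains k) ++ [x] := by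
          rw [List.filter_append]
          simp [hxp]
        rw [h1, h2, List.append_assoc]
      · intro y hy
        have hy25 : keyB y ≤ 25 := keyB_le y
        have hx25 : keyB x = 25 := keyB_of_not_mem x hxp
        simp only [decide_eq_false_iff_not, hx25]
        omega

-- A's nested accumulation of first-seen keys is set(flattened keys) in insertion order
lemma all_keys_eq (rows : List (List (String × String))) :
    rows.foldl (fun acc r =>
        r.foldl (fun acc kv => if acc.contains kv.1 then acc else acc ++ [kv.1]) acc) []
      = PySem.Set.ofList (rows.flatMap (fun r => r.map Prod.fst)) := by
  rw [PySem.Set.ofList_eq_foldl, List.foldl_flatMap]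
  apply PySem.List.foldl_congr_mem
  intro acc r _
  rw [List.foldl_map]
  rfl

-- ===== VERDICT (by name: the statement is the Claim_ definition above) =====
theorem select_emergency_contacts_fields_py_spec : Claim_equal_select_emergency_contacts_fields_py := by
  intro rows _
  unfold Spec_select_emergency_contacts_fields_py
  unfold select_emergency_contacts_fields_py select_emergency_contacts_fields_py_alt
  by_cases hrows : rows = []
  · subst hrows; rfl
  · simp only [hrows, if_false]
    rw [all_keys_eq]
    set S := PySem.Set.ofList (rows.flatMap (fun r => r.map Prod.fst)) with hSdef
    have hnodup : S.Nodup := PySem.Set.nodup_ofList _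
    have hB : PySem.List.dedup (rows.flatMap (fun r => r.map Prod.fst)) = S := rfl
    rw [hB]
    have hkey : (fun k => PySem.Dict.getD rank_alt k ((preferredOrder.length : Int))) = keyB := rfl
    rw [hkey, sorted_keyB S hnodup]
    -- it remains to rewrite A's second filter: for k ∈ S, k ∉ ordered ↔ k ∉ preferred_order
    congr 1
    apply List.filter_congr
    intro k hk
    have hkS : S.contains k = true := by simpa using hk
    by_cases hkp : k ∈ preferredOrder
    · simp only [List.contains_eq_mem, List.mem_filter, hkp, true_and]
      simp [hk]
    · simp [List.contains_eq_mem, List.mem_filter, hkp]
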